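-- pv_equiv track=rewrite | github.com/Mput13/hackathon | analytics/funnel_discovery.py | filter_redundant_sequences
-- ===== SOURCE A (Python) =====
-- from typing import List, Dict, Set, Tuple, Any, Optional
--
-- def filter_redundant_sequences(sequences: List[Tuple[List[str], int]]) -> List[Tuple[List[str], int]]:
--     """
--     Фильтрует избыточные последовательности
--     Убирает подпоследовательности, если есть более длинная последовательность с такой же частотой
--     """
--     if not sequences:
--         return []
--
--     # Сортируем по длине (от больших к меньшим) и частоте
--     sequences_sorted = sorted(sequences, key=lambda x: (-len(x[0]), -x[1]))
--
--     filtered = []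
--     seen_prefixes = set()
--
--     for seq, count in sequences_sorted:
--         seq_tuple = tuple(seq)
--
--         # Проверяем, не является ли это подпоследовательностью уже добавленной
--         is_subsequence = False
--         for existing_seq_tuple in seen_prefixes:
--             if len(seq) < len(existing_seq_tuple):
--                 # Проверяем, содержится ли seq в existing_seq
--                 seq_str = '|'.join(seq)
--                 existing_str = '|'.join(existing_seq_tuple)
--                 if seq_str in existing_str:
--                     is_subsequence = True
--                     break
--
--         if not is_subsequence:
--             filtered.append((seq, count))
--             seen_prefixes.add(seq_tuple)
--
--     return filtered
-- ===== SOURCE B (Python) =====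
-- from typing import List, Tuple
--
-- def filter_redundant_sequences(sequences: List[Tuple[List[str], int]]) -> List[Tuple[List[str], int]]:
--     """Stateless re-implementation: a sequence is redundant iff SOME strictly longer
--     sequence of the input contains its '|'-join as a substring (containment is
--     transitive and longer witnesses exist whenever filtered ones do, so checking
--     against the whole input equals checking against the kept ones)."""
--     ordered = sorted(sequences, key=lambda x: (-len(x[0]), -x[1]))
--     return [(seq, cnt) for seq, cnt in ordered
--             if not any(len(q) > len(seq) and '|'.join(seq) in '|'.join(q)
--                        for q, _ in sequences)]
-- ===== Notes on version B (the rewrite author's own statement) =====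
-- stated objective: simpler
-- what changed: A keeps a mutable set of already-kept sequences and tests each candidate against it inside the sorted loop; B is a stateless filter over the sorted list that tests each sequence against the whole input (valid because '|'-join substring containment is transitive, so a longer container exists among the kept ones iff one exists at all).
import Mathlib
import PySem

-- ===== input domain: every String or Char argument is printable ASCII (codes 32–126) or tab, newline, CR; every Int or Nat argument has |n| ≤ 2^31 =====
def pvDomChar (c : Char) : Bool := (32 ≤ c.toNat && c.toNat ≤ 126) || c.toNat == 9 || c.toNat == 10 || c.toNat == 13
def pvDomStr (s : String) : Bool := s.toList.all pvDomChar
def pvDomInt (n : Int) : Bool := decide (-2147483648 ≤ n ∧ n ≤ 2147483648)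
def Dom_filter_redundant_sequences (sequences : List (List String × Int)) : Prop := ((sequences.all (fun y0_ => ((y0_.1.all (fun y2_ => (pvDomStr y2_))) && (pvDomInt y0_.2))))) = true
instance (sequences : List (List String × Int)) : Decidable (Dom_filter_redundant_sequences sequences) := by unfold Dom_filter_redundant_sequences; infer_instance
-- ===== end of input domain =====

-- B replaces A's stateful loop (substring test against the already-kept set) by a
-- stateless filter against the whole input (objective: simpler; the two tests agree
-- because '|'-join containment is transitive).

-- ===== PORT A =====
-- '|'.join(seq)
def pvJoin (s : List String) : String := PySem.Str.join "|" s

-- the inner "for existing_seq_tuple in seen_prefixes: … break" loop (returns is_subsequence;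
-- only existence is consumed, so iterating the Set's list is order-independent)
def pvInnerA (s : List String) : List (List String) → Bool
  | [] => false
  | t :: rest =>
      if s.length < t.length then
        if PySem.Str.isIn (pvJoin s) (pvJoin t) then true else pvInnerA s rest
      else pvInnerA s rest

def filter_redundant_sequences (sequences : List (List String × Int)) : List (List String × Int) :=
  if sequences.isEmpty then []
  else
    let sequences_sorted := PySem.List.sorted2 sequences (fun x => -(x.1.length : Int)) (fun x => -x.2)
    (sequences_sorted.foldl
      (fun (st : List (List String × Int) × PySem.Set (List String)) p =>
        let is_subsequence := pvInnerA p.1 st.2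
        if is_subsequence then st
        else (st.1 ++ [p], PySem.Set.add st.2 p.1))
      ([], PySem.Set.empty)).1

-- ===== PORT B =====
-- any(len(q) > len(seq) and '|'.join(seq) in '|'.join(q) for q, _ in sequences)
def pvLC (l : List (List String × Int)) (s : List String) : Bool :=
  l.any (fun q => decide (s.length < q.1.length) && PySem.Str.isIn (pvJoin s) (pvJoin q.1))

def filter_redundant_sequences_alt (sequences : List (List String × Int)) : List (List String × Int) :=
  (PySem.List.sorted2 sequences (fun x => -(x.1.length : Int)) (fun x => -x.2)).filter
    (fun p => !pvLC sequences p.1)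

-- ===== PRECONDITION & SPEC =====
def Spec_filter_redundant_sequences (sequences : List (List String × Int)) (out : List (List String × Int)) : Prop := out = filter_redundant_sequences_alt sequences
instance (sequences : List (List String × Int)) (out : List (List String × Int)) : Decidable (Spec_filter_redundant_sequences sequences out) := by unfold Spec_filter_redundant_sequences; infer_instance

-- ===== CLAIM (what is proved, stated in full; the proofs are below) =====
def Claim_equal_filter_redundant_sequences : Prop := ∀ (sequences : List (List String × Int)), Dom_filter_redundant_sequences sequences → Spec_filter_redundant_sequences sequences (filter_redundant_sequences sequences)

-- ===== LEMMAS AND PROOFS =====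

-- the break-loop is an existence test
lemma pvInnerA_eq_any (s : List String) (ts : List (List String)) :
    pvInnerA s ts = ts.any (fun t => decide (s.length < t.length) && PySem.Str.isIn (pvJoin s) (pvJoin t)) := by
  induction ts with
  | nil => rfl
  | cons t rest ih =>
      simp only [pvInnerA, List.any_cons]
      split_ifs with h1 h2
      · rw [h2]; simp [h1]
      · rw [Bool.not_eq_true] at h2; rw [ih, h2]; simp
      · rw [ih]; simp [h1]

lemma pvIsIn_trans {a b c : String} (h1 : PySem.Str.isIn a b = true)
    (h2 : PySem.Str.isIn b c = true) : PySem.Str.isIn a c = true := by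
  rw [PySem.Str.isIn_iff_infix] at *
  exact h1.trans h2

lemma pvLC_iff (l : List (List String × Int)) (s : List String) :
    pvLC l s = true ↔ ∃ q ∈ l, s.length < q.1.length ∧ PySem.Str.isIn (pvJoin s) (pvJoin q.1) = true := by
  simp [pvLC, List.any_eq_true]

-- insertion keeps a transitive pairwise order the comparator respects
lemma pvInsertBy_pairwise {α : Type} {P : α → α → Prop} {before : α → α → Bool} (x : α)
    (htrans : ∀ a b c, P a b → P b c → P a c)
    (hT : ∀ y, before x y = true → P x y) (hF : ∀ y, before x y = false → P y x) :
    ∀ ys : List α, ys.Pairwise P → (PySem.List.insertBy before x ys).Pairwise P := by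
  intro ys hp
  induction ys with
  | nil => simp [PySem.List.insertBy]
  | cons y ys ih =>
      rw [List.pairwise_cons] at hp
      obtain ⟨hy, hys⟩ := hp
      show (if before x y = true then x :: y :: ys else y :: PySem.List.insertBy before x ys).Pairwise P
      split_ifs with hb
      · refine List.Pairwise.cons ?_ (List.Pairwise.cons hy hys)
        intro z hz
        rcases List.mem_cons.mp hz with rfl | hz'
        · exact hT _ hb
        · exact htrans _ _ _ (hT _ hb) (hy _ hz')
      · refine List.Pairwise.cons ?_ (ih hys)
        intro z hz
        rcases (PySem.List.insertBy_mem_iff _ _ _ _).mp hz with rfl | hz'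
        · exact hF _ (Bool.not_eq_true _ ▸ hb)
        · exact hy z hz'

-- the sorted2 output is pairwise non-increasing in the length of the first component
lemma pvSorted2_len_pairwise (xs : List (List String × Int)) :
    (PySem.List.sorted2 xs (fun x => -(x.1.length : Int)) (fun x => -x.2)).Pairwise
      (fun a b => b.1.length ≤ a.1.length) := by
  have hdef : PySem.List.sorted2 xs (fun x => -(x.1.length : Int)) (fun x => -x.2)
      = xs.foldl (fun acc x => PySem.List.insertBy
          (fun a b => decide (-(a.1.length : Int) < -(b.1.length : Int)) ||
            (!decide (-(b.1.length : Int) < -(a.1.length : Int)) && decide (-a.2 < -b.2))) x acc) [] := rfl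
  rw [hdef]
  have H : ∀ (l : List (List String × Int)) acc,
      acc.Pairwise (fun a b : List String × Int => b.1.length ≤ a.1.length) →
      (l.foldl (fun acc x => PySem.List.insertBy
        (fun a b => decide (-(a.1.length : Int) < -(b.1.length : Int)) ||
          (!decide (-(b.1.length : Int) < -(a.1.length : Int)) && decide (-a.2 < -b.2))) x acc) acc).Pairwise
        (fun a b : List String × Int => b.1.length ≤ a.1.length) := by
    intro l
    induction l with
    | nil => intro acc h; simpa using h
    | cons x l ih =>
        intro acc h
        refine ih _ (pvInsertBy_pairwise
          (P := fun a b : List String × Int => b.1.length ≤ a.1.length)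
          (before := fun a b => decide (-(a.1.length : Int) < -(b.1.length : Int)) ||
            (!decide (-(b.1.length : Int) < -(a.1.length : Int)) && decide (-a.2 < -b.2)))
          x (fun a b c h1 h2 => le_trans h2 h1) ?_ ?_ acc h)
        · intro y hy
          simp only [Bool.or_eq_true, Bool.and_eq_true, decide_eq_true_iff, Bool.not_eq_eq_eq_not,
            Bool.not_true, decide_eq_false_iff_not] at hy
          rcases hy with h' | ⟨h', _⟩ <;> omega
        · intro y hy
          simp only [Bool.or_eq_false_iff, Bool.and_eq_false_iff, decide_eq_false_iff_not] at hy
          omega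
  exact H xs [] List.Pairwise.nil

-- kept elements of a processed prefix, relative to a fixed list l
def pvKept (l : List (List String × Int)) (pre : List (List String × Int)) : List (List String × Int) :=
  pre.filter (fun p => !pvLC l p.1)

-- the chain argument: any longer container yields a NON-redundant longer container
lemma pvChain (l : List (List String × Int)) (s : List String) :
    ∀ n : Nat, ∀ q ∈ l, s.length < q.1.length →
      PySem.Str.isIn (pvJoin s) (pvJoin q.1) = true →
      (l.foldl (fun acc y => max acc y.1.length) 0) - q.1.length ≤ n →
      ∃ q' ∈ l, pvLC l q'.1 = false ∧ s.length < q'.1.length ∧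
        PySem.Str.isIn (pvJoin s) (pvJoin q'.1) = true := by
  intro n
  induction n with
  | zero =>
      intro q hq hlen hin hb
      by_cases hr : pvLC l q.1 = true
      · obtain ⟨q2, hq2, hl2, hi2⟩ := (pvLC_iff l q.1).mp hr
        have hb2 := (PySem.List.le_foldl_max_nat l (fun y => y.1.length) 0).2 q2 hq2
        omega
      · exact ⟨q, hq, Bool.not_eq_true _ ▸ hr, hlen, hin⟩
  | succ n ih =>
      intro q hq hlen hin hb
      by_cases hr : pvLC l q.1 = true
      · obtain ⟨q2, hq2, hl2, hi2⟩ := (pvLC_iff l q.1).mp hr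
        have hb2 := (PySem.List.le_foldl_max_nat l (fun y => y.1.length) 0).2 q2 hq2
        exact ih q2 hq2 (by omega) (pvIsIn_trans hin hi2) (by omega)
      · exact ⟨q, hq, Bool.not_eq_true _ ▸ hr, hlen, hin⟩

-- the heart: at each step the test against the kept set equals the global test
lemma pvStep_eq (l pre p rest) (hp : l.Pairwise (fun a b : List String × Int => b.1.length ≤ a.1.length))
    (hsplit : l = pre ++ p :: rest) :
    pvInnerA p.1 (PySem.Set.ofList ((pvKept l pre).map Prod.fst)) = pvLC l p.1 := by
  rw [pvInnerA_eq_any]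
  rcases hLC : pvLC l p.1 with _ | _
  · -- global test false ⇒ no kept longer container either (kept ⊆ pre ⊆ l)
    rw [List.any_eq_false]
    intro t ht
    have ht' := (PySem.Set.mem_ofList _ _).mp ht
    obtain ⟨q, hqk, rfl⟩ := List.mem_map.mp ht'
    have hql : q ∈ l := by
      rw [hsplit]; exact List.mem_append_left _ (List.mem_of_mem_filter hqk)
    simp only [Bool.and_eq_true, decide_eq_true_iff, not_and]
    intro hlen hin
    have : pvLC l p.1 = true := (pvLC_iff l p.1).mpr ⟨q, hql, hlen, hin⟩
    rw [hLC] at this; cases this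
  · -- global test true ⇒ a non-redundant longer container exists, and it lies in pre
    obtain ⟨q0, hq0, hl0, hi0⟩ := (pvLC_iff l p.1).mp hLC
    obtain ⟨q', hq', hnr, hlen', hin'⟩ :=
      pvChain l p.1 (l.foldl (fun acc y => max acc y.1.length) 0) q0 hq0 hl0 hi0 (by omega)
    -- q' is strictly longer than p, so by sortedness it lies in pre
    have hqpre : q' ∈ pre := by
      rw [hsplit] at hq'
      rcases List.mem_append.mp hq' with h | h
      · exact h
      · exfalso
        rcases List.mem_cons.mp h with rfl | h'
        · omega
        · have := (List.pairwise_append.mp (hsplit ▸ hp)).2.1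
          rw [List.pairwise_cons] at this
          have := this.1 q' h'
          omega
    have hqk : q' ∈ pvKept l pre := List.mem_filter.mpr ⟨hqpre, by simp [hnr]⟩
    rw [List.any_eq_true]
    exact ⟨q'.1, (PySem.Set.mem_ofList _ _).mpr (List.mem_map.mpr ⟨q', hqk, rfl⟩),
      by rw [hin']; simp [hlen']⟩

-- the loop invariant: A's fold over the remaining suffix produces the filter of l
lemma pvFold_inv (l : List (List String × Int))
    (hp : l.Pairwise (fun a b : List String × Int => b.1.length ≤ a.1.length)) :
    ∀ rest pre, l = pre ++ rest →
      (rest.foldl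
        (fun (st : List (List String × Int) × PySem.Set (List String)) p =>
          let is_subsequence := pvInnerA p.1 st.2
          if is_subsequence then st
          else (st.1 ++ [p], PySem.Set.add st.2 p.1))
        (pvKept l pre, PySem.Set.ofList ((pvKept l pre).map Prod.fst))).1 = pvKept l l := by
  intro rest
  induction rest with
  | nil => intro pre hsplit; simp only [List.foldl_nil]; rw [hsplit, List.append_nil]
  | cons p rest ih =>
      intro pre hsplit
      rw [List.foldl_cons]
      have hstep := pvStep_eq l pre p rest hp hsplit
      have hsplit' : l = (pre ++ [p]) ++ rest := by rw [hsplit]; simp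
      rcases hLC : pvLC l p.1 with _ | _ <;> rw [hLC] at hstep
      · -- kept: p goes into filtered and its first component into seen
        have hkept : pvKept l (pre ++ [p]) = pvKept l pre ++ [p] := by
          simp [pvKept, List.filter_append, hLC]
        have hseen : PySem.Set.add (PySem.Set.ofList ((pvKept l pre).map Prod.fst)) p.1
            = PySem.Set.ofList ((pvKept l (pre ++ [p])).map Prod.fst) := by
          rw [hkept, List.map_append, PySem.Set.ofList_eq_foldl, PySem.Set.ofList_eq_foldl,
            List.foldl_append]
          rfl
        have hgoal := ih (pre ++ [p]) hsplit'
        rw [hkept] at hgoal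
        simp only [hstep, Bool.false_eq_true, if_false, hseen, hkept]
        exact hgoal
      · -- dropped: state unchanged
        have hkept : pvKept l (pre ++ [p]) = pvKept l pre := by
          simp [pvKept, List.filter_append, hLC]
        have hgoal := ih (pre ++ [p]) hsplit'
        rw [hkept] at hgoal
        simp only [hstep, if_true]
        exact hgoal

-- ===== VERDICT (by name: the statement is the Claim_ definition above) =====
theorem filter_redundant_sequences_spec : Claim_equal_filter_redundant_sequences := by
  intro sequences _
  show filter_redundant_sequences sequences = filter_redundant_sequences_alt sequences
  by_cases hs : sequences = []
  · subst hs; rfl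
  · unfold filter_redundant_sequences filter_redundant_sequences_alt
    rw [if_neg (by simp [hs])]
    set l := PySem.List.sorted2 sequences (fun x => -(x.1.length : Int)) (fun x => -x.2) with hl
    have hperm : l.Perm sequences := PySem.List.sorted2_perm _ _ _ _
    have hfun : (fun p : List String × Int => !pvLC sequences p.1)
        = (fun p : List String × Int => !pvLC l p.1) := by
      funext p
      rw [show pvLC sequences p.1 = pvLC l p.1 from (hperm.any_eq).symm]
    rw [hfun]
    have := pvFold_inv l (pvSorted2_len_pairwise sequences) l [] rfl
    simpa [pvKept] using this
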